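-- pv_equiv track=rewrite | github.com/CarlAGNicholson/greening-the-spark | gts_lib/gts_utilities.py | formatCSVasLines
-- ===== SOURCE A (Python) =====
-- def formatCSVasLines(text,items_per_line):
--     '''Takes acomma separated list and splits it into lines'''
--     text_list = text.split(",")
--     formatted_text = ""
--     item_count = 1
--     for item in text_list:
--         formatted_text += item
--         item_count += 1
--         if item_count > items_per_line:
--             item_count = 1
--             formatted_text += "\n"
--         else:
--             formatted_text += ","
--
--     if formatted_text[len(formatted_text)-1] == ",":
--         formatted_text = formatted_text[0:len(formatted_text)-1] + "\n"
--     return formatted_text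
-- ===== SOURCE B (Python) =====
-- def formatCSVasLines(text, items_per_line):
--     '''Takes a comma separated list and splits it into lines'''
--     items = text.split(",")
--     step = items_per_line if items_per_line > 1 else 1
--     lines = [",".join(items[i:i + step]) for i in range(0, len(items), step)]
--     return "\n".join(lines) + "\n"
-- ===== Notes on version B (the rewrite author's own statement) =====
-- stated objective: simpler
-- what changed: Replaces A's per-item counter-and-branch string accumulation plus trailing-comma patch-up by a chunk-then-join pass: split once, slice the list in steps of max(items_per_line,1), join each chunk with ',' and the chunks with ' '.
import Mathlib
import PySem

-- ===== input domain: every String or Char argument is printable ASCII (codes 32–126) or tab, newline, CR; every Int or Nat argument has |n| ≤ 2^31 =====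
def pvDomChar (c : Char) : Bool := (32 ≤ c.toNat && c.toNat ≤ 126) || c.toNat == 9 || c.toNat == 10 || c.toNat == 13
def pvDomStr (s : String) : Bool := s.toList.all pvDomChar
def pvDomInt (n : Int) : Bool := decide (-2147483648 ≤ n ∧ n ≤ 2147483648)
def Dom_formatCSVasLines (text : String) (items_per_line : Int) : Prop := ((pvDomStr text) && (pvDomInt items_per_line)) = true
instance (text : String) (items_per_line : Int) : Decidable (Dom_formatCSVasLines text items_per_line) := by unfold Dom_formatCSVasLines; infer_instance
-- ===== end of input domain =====

-- B replaces A's per-item counter-and-branch accumulation (plus trailing-comma patch-up)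
-- by a chunk-then-join pass of the same cost; equivalence is proved on all inputs (both total).

-- ===== PORT A =====
-- loop body of A: formatted_text += item; item_count += 1; newline or comma
def pvLoopA (items_per_line : Int) (st : String × Int) (item : String) : String × Int :=
  let formatted_text := st.1 ++ item
  let item_count := st.2 + 1
  if item_count > items_per_line then (formatted_text ++ "\n", 1)
  else (formatted_text ++ ",", item_count)

-- A's final patch-up: if formatted_text[len-1] == "," replace it by "\n"
def pvFixA (formatted_text : String) : String :=
  if PySem.Str.pyGet? formatted_text (PySem.Str.len formatted_text - 1) = some ',' then
    PySem.Str.slice formatted_text (some 0) (some (PySem.Str.len formatted_text - 1)) ++ "\n"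
  else formatted_text

def formatCSVasLines (text : String) (items_per_line : Int) : String :=
  let text_list := (PySem.Str.split? text ",").getD []
  pvFixA (text_list.foldl (pvLoopA items_per_line) ("", 1)).1

-- ===== PORT B =====
def formatCSVasLines_alt (text : String) (items_per_line : Int) : String :=
  let items := (PySem.Str.split? text ",").getD []
  let step : Int := if items_per_line > 1 then items_per_line else 1
  let lines := (PySem.List.pyRange 0 (items.length : Int) step).map
    (fun i => PySem.Str.join "," (PySem.List.slice items (some i) (some (i + step))))
  PySem.Str.join "\n" lines ++ "\n"

-- ===== PRECONDITION & SPEC =====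
def Spec_formatCSVasLines (text : String) (items_per_line : Int) (out : String) : Prop := out = formatCSVasLines_alt text items_per_line
instance (text : String) (items_per_line : Int) (out : String) : Decidable (Spec_formatCSVasLines text items_per_line out) := by unfold Spec_formatCSVasLines; infer_instance

-- ===== CLAIM (what is proved, stated in full; the proofs are below) =====
def Claim_equal_formatCSVasLines : Prop := ∀ (text : String) (items_per_line : Int), Dom_formatCSVasLines text items_per_line → Spec_formatCSVasLines text items_per_line (formatCSVasLines text items_per_line)

-- ===== LEMMAS AND PROOFS =====

-- proof-side normal forms
def rawA (ipl : Int) : Int → List String → String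
  | _, [] => ""
  | c, x :: xs => if c + 1 > ipl then x ++ "\n" ++ rawA ipl 1 xs else x ++ "," ++ rawA ipl (c + 1) xs

def chunksPos (k : Nat) : List String → List (List String)
  | [] => []
  | x :: xs => (x :: xs.take (k - 1)) :: chunksPos k (xs.drop (k - 1))
termination_by xs => xs.length
decreasing_by simp [List.length_drop]

lemma chunksPos_nil (k : Nat) : chunksPos k [] = [] := by
  rw [chunksPos.eq_def]

lemma chunksPos_cons (k : Nat) (x : String) (xs : List String) :
    chunksPos k (x :: xs) = (x :: xs.take (k - 1)) :: chunksPos k (xs.drop (k - 1)) := by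
  rw [chunksPos.eq_def]

def glue : List (List String) → String
  | [] => ""
  | c :: cs => PySem.Str.join "," c ++ "\n" ++ glue cs

-- Str.join structural facts (via the Chars lemmas)
lemma sjoin_singleton (sep p : String) : PySem.Str.join sep [p] = p := by
  apply String.toList_inj.mp
  simp [PySem.Str.toList_join, PySem.Chars.join_singleton]

lemma sjoin_cons_cons (sep p q : String) (rest : List String) :
    PySem.Str.join sep (p :: q :: rest) = p ++ sep ++ PySem.Str.join sep (q :: rest) := by
  apply String.toList_inj.mp
  simp [PySem.Str.toList_join, PySem.Chars.join_cons_cons]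

-- A's fold only ever appends to the string: the accumulator is a prefix
lemma foldA_prefix (ipl : Int) : ∀ (xs : List String) (s : String) (c : Int),
    xs.foldl (pvLoopA ipl) (s, c) = (s ++ (xs.foldl (pvLoopA ipl) ("", c)).1, (xs.foldl (pvLoopA ipl) ("", c)).2) := by
  intro xs
  induction xs with
  | nil => intro s c; simp
  | cons x xs ih =>
    intro s c
    simp only [List.foldl, pvLoopA]
    by_cases h : c + 1 > ipl
    · rw [if_pos h, if_pos h]
      rw [ih (s ++ x ++ "\n") 1]
      rw [ih ("" ++ x ++ "\n") 1]
      simp [String.append_assoc]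
    · rw [if_neg h, if_neg h]
      rw [ih (s ++ x ++ ",") (c + 1)]
      rw [ih ("" ++ x ++ ",") (c + 1)]
      simp [String.append_assoc]

lemma foldA_eq_rawA (ipl : Int) : ∀ (xs : List String) (c : Int),
    (xs.foldl (pvLoopA ipl) ("", c)).1 = rawA ipl c xs := by
  intro xs
  induction xs with
  | nil => intro c; rfl
  | cons x xs ih =>
    intro c
    simp only [List.foldl, pvLoopA]
    rw [rawA]
    by_cases h : c + 1 > ipl
    · rw [if_pos h, if_pos h, foldA_prefix ipl xs ("" ++ x ++ "\n") 1, ← ih 1]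
      simp [String.append_assoc]
    · rw [if_neg h, if_neg h, foldA_prefix ipl xs ("" ++ x ++ ",") (c + 1), ← ih (c + 1)]
      simp [String.append_assoc]

-- a full chunk: the counter resets exactly after ys
lemma rawA_chunk (ipl : Int) : ∀ (ys : List String) (c : Int) (zs : List String),
    ys.length = (ipl - c).toNat + 1 →
    rawA ipl c (ys ++ zs) = PySem.Str.join "," ys ++ "\n" ++ rawA ipl 1 zs := by
  intro ys
  induction ys with
  | nil => intro c zs h; simp at h
  | cons y ys ih =>
    intro c zs h
    cases ys with
    | nil =>
      have hc : c + 1 > ipl := by simp at h; omega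
      rw [List.cons_append, List.nil_append, rawA, if_pos hc, sjoin_singleton]
    | cons y' ys' =>
      have hc : ¬ (c + 1 > ipl) := by simp at h; omega
      rw [List.cons_append, rawA, if_neg hc, ih (c + 1) zs (by simp at h ⊢; omega), sjoin_cons_cons]
      simp [String.append_assoc]

-- a partial trailing chunk: every item still takes the comma branch
lemma rawA_partial (ipl : Int) : ∀ (xs : List String) (c : Int),
    xs ≠ [] → (xs.length : Int) ≤ ipl - c →
    rawA ipl c xs = PySem.Str.join "," xs ++ "," := by
  intro xs
  induction xs with
  | nil => intro c h; simp at h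
  | cons x xs ih =>
    intro c _ hlen
    have hc : ¬ (c + 1 > ipl) := by simp at hlen; omega
    cases xs with
    | nil =>
      rw [rawA, if_neg hc, sjoin_singleton, rawA]
      simp
    | cons y t =>
      rw [rawA, if_neg hc, ih (c + 1) (by simp) (by simp at hlen ⊢; omega), sjoin_cons_cons]
      simp [String.append_assoc]

lemma chunksPos_ne_nil (k : Nat) (xs : List String) (h : xs ≠ []) : chunksPos k xs ≠ [] := by
  cases xs with
  | nil => exact absurd rfl h
  | cons x xs => rw [chunksPos_cons]; simp

-- core: rawA from counter 1 is glue of the chunks, up to the trailing "," vs "\n"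
lemma rawA_glue (ipl : Int) : ∀ (n : Nat) (xs : List String), xs.length ≤ n → xs ≠ [] →
    (∃ t, rawA ipl 1 xs = t ++ "," ∧ glue (chunksPos ((ipl - 1).toNat + 1) xs) = t ++ "\n")
    ∨ (rawA ipl 1 xs = glue (chunksPos ((ipl - 1).toNat + 1) xs) ∧ ∃ t, rawA ipl 1 xs = t ++ "\n") := by
  intro n
  induction n with
  | zero => intro xs h hne; cases xs with
    | nil => exact absurd rfl hne
    | cons x xs => simp at h
  | succ n ih =>
    intro xs hlen hne
    cases xs with
    | nil => exact absurd rfl hne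
    | cons x xs =>
      set k : Nat := (ipl - 1).toNat + 1 with hk
      by_cases hsmall : (x :: xs).length < k
      · -- one partial chunk
        left
        refine ⟨PySem.Str.join "," (x :: xs), ?_, ?_⟩
        · exact rawA_partial ipl (x :: xs) 1 (by simp) (by simp at hsmall ⊢; omega)
        · have ht : xs.take (k - 1) = xs := List.take_of_length_le (by simp at hsmall; omega)
          have hd : xs.drop (k - 1) = [] := List.drop_eq_nil_of_le (by simp at hsmall; omega)
          rw [chunksPos_cons, ht, hd, chunksPos_nil]
          simp [glue, String.append_empty]
      · -- peel one full chunk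
        have hk1 : k - 1 ≤ xs.length := by simp at hsmall; omega
        have hdec : x :: xs = (x :: xs.take (k - 1)) ++ xs.drop (k - 1) := by
          simp [List.take_append_drop]
        have hys : (x :: xs.take (k - 1)).length = (ipl - 1).toNat + 1 := by
          simp [List.length_take, Nat.min_eq_left hk1]; omega
        have hr : rawA ipl 1 (x :: xs)
            = PySem.Str.join "," (x :: xs.take (k - 1)) ++ "\n" ++ rawA ipl 1 (xs.drop (k - 1)) := by
          conv_lhs => rw [hdec]
          exact rawA_chunk ipl (x :: xs.take (k - 1)) 1 (xs.drop (k - 1)) hys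
        rw [hr, chunksPos_cons, glue]
        cases hz : xs.drop (k - 1) with
        | nil =>
          right
          constructor
          · simp [rawA, glue, chunksPos_nil]
          · exact ⟨PySem.Str.join "," (x :: xs.take (k - 1)), by simp [rawA]⟩
        | cons z zs =>
          have hzl : (z :: zs).length ≤ n := by
            have h5 : (xs.drop (k - 1)).length ≤ xs.length := by
              rw [List.length_drop]; omega
            rw [hz] at h5
            simp at hlen h5 ⊢
            omega
          rcases ih (z :: zs) hzl (by simp) with ⟨t, h1, h2⟩ | ⟨heq, t, h3⟩
          · left
            refine ⟨PySem.Str.join "," (x :: xs.take (k - 1)) ++ "\n" ++ t, ?_, ?_⟩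
            · rw [h1]; simp [String.append_assoc]
            · rw [h2]; simp [String.append_assoc]
          · right
            refine ⟨by rw [heq], PySem.Str.join "," (x :: xs.take (k - 1)) ++ "\n" ++ t, ?_⟩
            rw [h3]; simp [String.append_assoc]

-- A's patch-up on a string that ends in ","
lemma fix_comma (s t : String) (h : s = t ++ ",") : pvFixA s = t ++ "\n" := by
  subst h
  have hts : (t ++ ",").toList = t.toList ++ [','] := by
    rw [String.toList_append]; rfl
  have hlen : PySem.Str.len (t ++ ",") - 1 = ((t.toList.length : Nat) : Int) := by
    rw [PySem.Str.len_eq, hts]; simp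
  have hget : PySem.Str.pyGet? (t ++ ",") (PySem.Str.len (t ++ ",") - 1) = some ',' := by
    rw [hlen, PySem.Str.pyGet?_natCast, hts]
    simp
  rw [pvFixA, if_pos hget]
  congr 1
  apply String.toList_inj.mp
  rw [PySem.Str.toList_slice, hlen]
  simp only [PySem.Chars.slice_eq_listSlice]
  rw [PySem.List.slice_zero_start, PySem.List.slice_to _ (by positivity)]
  rw [hts]
  simp

-- A's patch-up on a string that ends in "\n" does nothing
lemma fix_nl (s t : String) (h : s = t ++ "\n") : pvFixA s = s := by
  subst h
  have hts : (t ++ "\n").toList = t.toList ++ ['\n'] := by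
    rw [String.toList_append]; rfl
  have hlen : PySem.Str.len (t ++ "\n") - 1 = ((t.toList.length : Nat) : Int) := by
    rw [PySem.Str.len_eq, hts]; simp
  have hget : PySem.Str.pyGet? (t ++ "\n") (PySem.Str.len (t ++ "\n") - 1) = some '\n' := by
    rw [hlen, PySem.Str.pyGet?_natCast, hts]
    simp
  rw [pvFixA, if_neg]
  rw [hget]
  simp

-- split(",") never returns the empty list
lemma go_ne_nil (sep : List Char) : ∀ (fuel : Nat) (l cur : List Char) (acc : List (List Char)),
    PySem.Chars.splitOn.go sep fuel l cur acc ≠ [] := by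
  intro fuel
  induction fuel with
  | zero => intro l cur acc; rw [PySem.Chars.splitOn.go.eq_def]; simp
  | succ n ih =>
    intro l cur acc
    rw [PySem.Chars.splitOn.go.eq_def]
    cases l with
    | nil => simp
    | cons c rest =>
      by_cases h : sep.isPrefixOf (c :: rest)
      · simp only [h, if_pos]; exact ih _ _ _
      · simp only [h]; exact ih _ _ _

lemma splitList_ne_nil (text : String) : (PySem.Str.split? text ",").getD [] ≠ [] := by
  rw [PySem.Str.split?, PySem.Chars.split?]
  have : (",".toList).isEmpty = false := by decide
  rw [if_neg (by simp)]
  simp only [Option.map_some, Option.getD_some, ne_eq, List.map_eq_nil_iff]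
  exact go_ne_nil _ _ _ _ _

-- pyRange with positive step: cons form
lemma pvRange_pos_cons (a b s : Int) (hs : 0 < s) (hab : a < b) :
    PySem.List.pyRange a b s = a :: PySem.List.pyRange (a + s) b s := by
  rw [PySem.List.pyRange_of_pos _ _ hs, PySem.List.pyRange_of_pos _ _ hs]
  have hX : 0 ≤ b - a - 1 := by omega
  have hdiv : (b - a + s - 1) / s = (b - a - 1) / s + 1 := by
    have : b - a + s - 1 = (b - a - 1) + 1 * s := by ring
    rw [this, Int.add_mul_ediv_right _ _ (by omega)]
  by_cases h2 : a + s < b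
  · have hX2 : b - (a + s) + s - 1 = b - a - 1 := by ring
    have hq : 0 ≤ (b - a - 1) / s := Int.ediv_nonneg hX (le_of_lt hs)
    rw [if_pos hab, if_pos h2, hX2, hdiv]
    have : ((b - a - 1) / s + 1).toNat = ((b - a - 1) / s).toNat + 1 := by omega
    rw [this, List.range_succ_eq_map]
    simp only [List.map_cons, List.map_map]
    congr 1
    · simp
    · apply List.map_congr_left
      intro i _
      simp only [Function.comp_apply, Nat.succ_eq_add_one]
      push_cast
      ring
  · rw [if_pos hab, if_neg h2]
    have h0 : (b - a - 1) / s = 0 := Int.ediv_eq_zero_of_lt hX (by omega)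
    rw [hdiv, h0]
    simp

-- pyRange with positive step: index shift
lemma pvRange_shift (a b s : Int) (hs : 0 < s) :
    PySem.List.pyRange (a + s) b s = (PySem.List.pyRange a (b - s) s).map (· + s) := by
  rw [PySem.List.pyRange_of_pos _ _ hs, PySem.List.pyRange_of_pos _ _ hs, List.map_map]
  have hc : b - (a + s) + s - 1 = b - s - a + s - 1 := by ring
  have hiff : (a + s < b) ↔ (a < b - s) := by omega
  simp only [hc, hiff]
  apply List.map_congr_left
  intro i _
  simp only [Function.comp_apply]
  ring

-- B's comprehension produces exactly the joined chunks
lemma B_lines (s : Int) (hs : 0 < s) : ∀ (n : Nat) (xs : List String), xs.length ≤ n →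
    (PySem.List.pyRange 0 (xs.length : Int) s).map
      (fun i => PySem.Str.join "," (PySem.List.slice xs (some i) (some (i + s))))
    = (chunksPos s.toNat xs).map (fun c => PySem.Str.join "," c) := by
  intro n
  induction n with
  | zero =>
    intro xs h
    have hxs : xs = [] := List.length_eq_zero_iff.mp (by omega)
    subst hxs
    rw [PySem.List.pyRange_of_pos _ _ hs]
    simp [chunksPos_nil]
  | succ n ih =>
    intro xs hlen
    cases xs with
    | nil =>
      rw [PySem.List.pyRange_of_pos _ _ hs]
      simp [chunksPos_nil]
    | cons x xs =>
      have hpos : (0 : Int) < ((x :: xs).length : Int) := by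
        exact_mod_cast Nat.succ_pos xs.length
      rw [pvRange_pos_cons 0 _ s hs hpos, List.map_cons]
      have hhead : PySem.List.slice (x :: xs) (some 0) (some (0 + s))
          = x :: xs.take (s.toNat - 1) := by
        rw [zero_add, PySem.List.slice_toNat _ le_rfl (le_of_lt hs)]
        simp only [Int.toNat_zero, Nat.sub_zero, List.drop_zero]
        obtain ⟨m, hm⟩ : ∃ m, s.toNat = m + 1 := ⟨s.toNat - 1, by omega⟩
        rw [hm, List.take_succ_cons]
        simp
      rw [hhead]
      have hshift := pvRange_shift 0 (((x :: xs).length : Nat) : Int) s hs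
      rw [zero_add] at hshift
      simp only [zero_add]
      rw [hshift, List.map_map]
      rw [chunksPos_cons]
      simp only [List.map_cons]
      refine (List.cons_eq_cons).mpr ⟨rfl, ?_⟩
      have hdrop : xs.drop (s.toNat - 1) = (x :: xs).drop s.toNat := by
        have h1 : s.toNat = (s.toNat - 1) + 1 := by omega
        rw [h1, List.drop_succ_cons]
        simp
      rw [hdrop]
      by_cases hN : s ≤ ((x :: xs).length : Int)
      · have hle : ((x :: xs).drop s.toNat).length ≤ n := by
          rw [List.length_drop]
          simp at hlen ⊢
          omega
        rw [← ih ((x :: xs).drop s.toNat) hle]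
        have hzlen : ((((x :: xs).drop s.toNat).length : Nat) : Int) = ((x :: xs).length : Int) - s := by
          rw [List.length_drop]
          omega
        rw [hzlen]
        apply List.map_congr_left
        intro i hi
        have h0i : 0 ≤ i := ((PySem.List.mem_pyRange_iff_of_pos hs i).mp hi).1
        simp only [Function.comp_apply]
        congr 1
        have e1 : (i + s).toNat = s.toNat + i.toNat := by omega
        rw [PySem.List.slice_toNat _ (by omega) (by omega),
            PySem.List.slice_toNat _ (by omega) (by omega),
            List.drop_drop, e1]
        congr 1
        omega
      · have hz : (x :: xs).drop s.toNat = [] := by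
          apply List.drop_eq_nil_of_le
          simp at hN ⊢
          omega
        rw [hz, chunksPos_nil, PySem.List.pyRange_of_pos _ _ hs]
        rw [if_neg (by simp at hN ⊢; omega : ¬ ((0:Int) < ((x :: xs).length : Int) - s))]
        simp

-- joining the lines with "\n" and appending the final "\n" is glue
lemma joinNL : ∀ (chs : List (List String)), chs ≠ [] →
    PySem.Str.join "\n" (chs.map (fun c => PySem.Str.join "," c)) ++ "\n" = glue chs := by
  intro chs
  induction chs with
  | nil => intro h; exact absurd rfl h
  | cons c cs ih =>
    intro _
    cases cs with
    | nil => rw [List.map_cons, List.map_nil, sjoin_singleton, glue, glue]; simp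
    | cons c' t =>
      rw [List.map_cons, List.map_cons, sjoin_cons_cons, glue, ← ih (by simp), List.map_cons]
      simp [String.append_assoc]

-- ===== VERDICT (by name: the statement is the Claim_ definition above) =====
theorem formatCSVasLines_spec : Claim_equal_formatCSVasLines := by
  intro text ipl _
  unfold Spec_formatCSVasLines
  set xs := (PySem.Str.split? text ",").getD [] with hxsdef
  have hxs : xs ≠ [] := splitList_ne_nil text
  set s : Int := if ipl > 1 then ipl else 1 with hsdef
  have hs : 0 < s := by rw [hsdef]; split_ifs <;> omega
  have hkk : s.toNat = (ipl - 1).toNat + 1 := by rw [hsdef]; split_ifs <;> omega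
  show pvFixA ((xs.foldl (pvLoopA ipl) ("", 1)).1)
      = PySem.Str.join "\n" ((PySem.List.pyRange 0 ((xs.length : Nat) : Int) s).map
          (fun i => PySem.Str.join "," (PySem.List.slice xs (some i) (some (i + s))))) ++ "\n"
  rw [foldA_eq_rawA, B_lines s hs xs.length xs le_rfl, joinNL _ (chunksPos_ne_nil _ _ hxs), hkk]
  rcases rawA_glue ipl xs.length xs le_rfl hxs with ⟨t, h1, h2⟩ | ⟨heq, t, h3⟩
  · rw [fix_comma _ t h1, h2]
  · rw [fix_nl _ t h3, heq]
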